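-- pv_equiv track=rewrite | github.com/vamsikakis/recipe | backend/services/recommendation.py | violates_dietary_restrictions
-- ===== SOURCE A (Python) =====
-- from typing import List, Dict, Any, Optional
--
-- def violates_dietary_restrictions(recipe: Dict[str, Any], dietary_restrictions: List[str]) -> bool:
--     """Check if recipe violates any dietary restrictions"""
--     if not dietary_restrictions:
--         return False
--
--     recipe_ingredients = [ing.lower() for ing in recipe.get('ingredients', [])]
--     recipe_tags = [tag.lower() for tag in recipe.get('tags', [])]
--
--     for restriction in dietary_restrictions:
--         restriction_lower = restriction.lower()
--
--         if restriction_lower == 'vegetarian':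
--             non_veg_ingredients = ['chicken', 'beef', 'pork', 'lamb', 'fish', 'meat', 'egg']
--             if any(ing in recipe_ingredients for ing in non_veg_ingredients):
--                 return True
--
--         elif restriction_lower == 'vegan':
--             non_vegan_ingredients = ['milk', 'cheese', 'butter', 'cream', 'yogurt', 'egg', 'honey']
--             if any(ing in recipe_ingredients for ing in non_vegan_ingredients):
--                 return True
--
--         elif restriction_lower == 'gluten-free':
--             gluten_ingredients = ['wheat', 'flour', 'bread', 'pasta']
--             if any(ing in recipe_ingredients for ing in gluten_ingredients):
--                 return True
--
--         elif restriction_lower == 'dairy-free':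
--             dairy_ingredients = ['milk', 'cheese', 'butter', 'cream', 'yogurt']
--             if any(ing in recipe_ingredients for ing in dairy_ingredients):
--                 return True
--
--         elif restriction_lower == 'nut-free':
--             nut_ingredients = ['peanut', 'almond', 'cashew', 'walnut', 'pistachio']
--             if any(ing in recipe_ingredients for ing in nut_ingredients):
--                 return True
--
--     return False
-- ===== SOURCE B (Python) =====
-- # B inverts A's data flow: one pass over the INGREDIENTS accumulates the set of
-- # restriction names the recipe violates (via an inverted ingredient->restrictions
-- # table); each requested restriction is then a plain membership test.
-- VIOLATED_BY = {
--     'chicken': ('vegetarian',), 'beef': ('vegetarian',), 'pork': ('vegetarian',),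
--     'lamb': ('vegetarian',), 'fish': ('vegetarian',), 'meat': ('vegetarian',),
--     'egg': ('vegetarian', 'vegan'),
--     'milk': ('vegan', 'dairy-free'), 'cheese': ('vegan', 'dairy-free'),
--     'butter': ('vegan', 'dairy-free'), 'cream': ('vegan', 'dairy-free'),
--     'yogurt': ('vegan', 'dairy-free'), 'honey': ('vegan',),
--     'wheat': ('gluten-free',), 'flour': ('gluten-free',), 'bread': ('gluten-free',),
--     'pasta': ('gluten-free',),
--     'peanut': ('nut-free',), 'almond': ('nut-free',), 'cashew': ('nut-free',),
--     'walnut': ('nut-free',), 'pistachio': ('nut-free',),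
-- }
--
-- def violates_dietary_restrictions(recipe, dietary_restrictions):
--     """Check if recipe violates any dietary restrictions"""
--     violated = set()
--     for ing in recipe.get('ingredients', []):
--         violated.update(VIOLATED_BY.get(ing.lower(), ()))
--     return any(r.lower() in violated for r in dietary_restrictions)
-- ===== Notes on version B (the rewrite author's own statement) =====
-- stated objective: alternative
-- what changed: Inverted the data flow: instead of looping over restrictions and scanning the ingredient list per restriction, B makes one pass over the ingredients, accumulating via an inverted ingredient->restrictions table the set of restriction names the recipe violates, and then answers each requested restriction by a single membership test in that set.
import Mathlib
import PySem

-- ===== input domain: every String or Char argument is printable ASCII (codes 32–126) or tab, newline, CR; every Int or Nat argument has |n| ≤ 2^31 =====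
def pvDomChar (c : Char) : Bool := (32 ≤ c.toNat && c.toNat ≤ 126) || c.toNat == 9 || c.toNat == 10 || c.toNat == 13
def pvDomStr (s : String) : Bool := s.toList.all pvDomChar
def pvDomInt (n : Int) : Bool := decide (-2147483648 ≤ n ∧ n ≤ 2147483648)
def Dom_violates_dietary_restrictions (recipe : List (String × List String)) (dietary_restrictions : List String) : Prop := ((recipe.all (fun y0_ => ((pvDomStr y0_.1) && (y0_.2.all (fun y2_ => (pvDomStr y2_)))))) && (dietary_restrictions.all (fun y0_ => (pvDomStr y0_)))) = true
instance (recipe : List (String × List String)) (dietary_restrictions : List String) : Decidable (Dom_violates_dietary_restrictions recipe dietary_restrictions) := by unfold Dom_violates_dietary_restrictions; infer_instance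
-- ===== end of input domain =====

-- B inverts A's data flow: one pass over the ingredients accumulates the violated-restriction set via an inverted table, then each restriction is a membership test (objective: alternative).


-- ===== PORT A =====
-- recipe.get(k, []) on the assoc-list dict: first matching key, default []
def vdrGetA (recipe : List (String × List String)) (k : String) : List String :=
  ((recipe.find? (fun p => p.1 == k)).map (fun p => p.2)).getD []

-- the body of A's for-loop: the if/elif chain with per-branch list-membership scans
def vdrCheckA (ings : List String) (r : String) : Bool :=
  let rl := PySem.Str.lower r
  if rl == "vegetarian" then
    (["chicken", "beef", "pork", "lamb", "fish", "meat", "egg"]).any (fun ing => ings.contains ing)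
  else if rl == "vegan" then
    (["milk", "cheese", "butter", "cream", "yogurt", "egg", "honey"]).any (fun ing => ings.contains ing)
  else if rl == "gluten-free" then
    (["wheat", "flour", "bread", "pasta"]).any (fun ing => ings.contains ing)
  else if rl == "dairy-free" then
    (["milk", "cheese", "butter", "cream", "yogurt"]).any (fun ing => ings.contains ing)
  else if rl == "nut-free" then
    (["peanut", "almond", "cashew", "walnut", "pistachio"]).any (fun ing => ings.contains ing)
  else false

-- the for-loop with early 'return True'
def vdrLoopA (ings : List String) : List String -> Bool
  | [] => false
  | r :: rest => if vdrCheckA ings r then true else vdrLoopA ings rest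

def violates_dietary_restrictions (recipe : List (String × List String)) (dietary_restrictions : List String) : Bool :=
  if dietary_restrictions.isEmpty then false
  else
    let recipe_ingredients := (vdrGetA recipe "ingredients").map PySem.Str.lower
    let _recipe_tags := (vdrGetA recipe "tags").map PySem.Str.lower
    vdrLoopA recipe_ingredients dietary_restrictions

-- ===== PORT B =====
-- inverted table: ingredient -> restriction names it violates (Source B's VIOLATED_BY)
def vdrViolatedBy : PySem.Dict String (List String) :=
  PySem.Dict.ofList
  [("chicken", ["vegetarian"]), ("beef", ["vegetarian"]), ("pork", ["vegetarian"]),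
   ("lamb", ["vegetarian"]), ("fish", ["vegetarian"]), ("meat", ["vegetarian"]),
   ("egg", ["vegetarian", "vegan"]),
   ("milk", ["vegan", "dairy-free"]), ("cheese", ["vegan", "dairy-free"]),
   ("butter", ["vegan", "dairy-free"]), ("cream", ["vegan", "dairy-free"]),
   ("yogurt", ["vegan", "dairy-free"]), ("honey", ["vegan"]),
   ("wheat", ["gluten-free"]), ("flour", ["gluten-free"]), ("bread", ["gluten-free"]),
   ("pasta", ["gluten-free"]),
   ("peanut", ["nut-free"]), ("almond", ["nut-free"]), ("cashew", ["nut-free"]),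
   ("walnut", ["nut-free"]), ("pistachio", ["nut-free"])]

-- recipe.get('ingredients', []) in Source B
def vdrGetB (recipe : List (String × List String)) (k : String) : List String :=
  PySem.Dict.getD (PySem.Dict.mk recipe) k []

def violates_dietary_restrictions_alt (recipe : List (String × List String)) (dietary_restrictions : List String) : Bool :=
  let violated : PySem.Set String :=
    (vdrGetB recipe "ingredients").foldl
      (fun acc ing => PySem.Set.update acc (PySem.Dict.getD vdrViolatedBy (PySem.Str.lower ing) []))
      PySem.Set.empty
  dietary_restrictions.any (fun r => PySem.Set.contains violated (PySem.Str.lower r))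

-- ===== PRECONDITION & SPEC =====
def Spec_violates_dietary_restrictions (recipe : List (String × List String)) (dietary_restrictions : List String) (out : Bool) : Prop := out = violates_dietary_restrictions_alt recipe dietary_restrictions
instance (recipe : List (String × List String)) (dietary_restrictions : List String) (out : Bool) : Decidable (Spec_violates_dietary_restrictions recipe dietary_restrictions out) := by unfold Spec_violates_dietary_restrictions; infer_instance

-- ===== CLAIM (what is proved, stated in full; the proofs are below) =====
def Claim_equal_violates_dietary_restrictions : Prop := ∀ (recipe : List (String × List String)) (dietary_restrictions : List String), Dom_violates_dietary_restrictions recipe dietary_restrictions → Spec_violates_dietary_restrictions recipe dietary_restrictions (violates_dietary_restrictions recipe dietary_restrictions)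

-- ===== LEMMAS AND PROOFS =====
-- A's forbidden list for a (lowered) restriction name, matching vdrCheckA's branches
def vdrForb (rl : String) : List String :=
  if rl = "vegetarian" then ["chicken", "beef", "pork", "lamb", "fish", "meat", "egg"]
  else if rl = "vegan" then ["milk", "cheese", "butter", "cream", "yogurt", "egg", "honey"]
  else if rl = "gluten-free" then ["wheat", "flour", "bread", "pasta"]
  else if rl = "dairy-free" then ["milk", "cheese", "butter", "cream", "yogurt"]
  else if rl = "nut-free" then ["peanut", "almond", "cashew", "walnut", "pistachio"]
  else []

theorem vdrCheckA_eq_forb (ings : List String) (r : String) :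
    vdrCheckA ings r = (vdrForb (PySem.Str.lower r)).any (fun f => ings.contains f) := by
  unfold vdrCheckA vdrForb
  split_ifs <;> simp_all

-- the inverted table's items as a literal assoc list (fresh distinct keys: ofList appends)
def vdrPairs : List (String × List String) :=
  [("chicken", ["vegetarian"]), ("beef", ["vegetarian"]), ("pork", ["vegetarian"]),
   ("lamb", ["vegetarian"]), ("fish", ["vegetarian"]), ("meat", ["vegetarian"]),
   ("egg", ["vegetarian", "vegan"]),
   ("milk", ["vegan", "dairy-free"]), ("cheese", ["vegan", "dairy-free"]),
   ("butter", ["vegan", "dairy-free"]), ("cream", ["vegan", "dairy-free"]),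
   ("yogurt", ["vegan", "dairy-free"]), ("honey", ["vegan"]),
   ("wheat", ["gluten-free"]), ("flour", ["gluten-free"]), ("bread", ["gluten-free"]),
   ("pasta", ["gluten-free"]),
   ("peanut", ["nut-free"]), ("almond", ["nut-free"]), ("cashew", ["nut-free"]),
   ("walnut", ["nut-free"]), ("pistachio", ["nut-free"])]

theorem vdrTable_items : vdrViolatedBy = PySem.Dict.mk vdrPairs := by decide

-- first-match lookup in a nodup-key assoc list: rl is in the value at x iff some pair (x, v) holds rl
theorem vdrL (l : List (String × List String)) (hnd : (l.map Prod.fst).Nodup) (x rl : String) :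
    rl ∈ PySem.Dict.getD (PySem.Dict.mk l) x ([] : List String)
      ↔ ∃ v, (x, v) ∈ l ∧ rl ∈ v := by
  induction l with
  | nil => simp [PySem.Dict.getD, PySem.Dict.get?]
  | cons p t ih =>
    rw [PySem.Dict.getD_eq_get?_getD, PySem.Dict.get?_mk_cons]
    simp only [List.map_cons, List.nodup_cons] at hnd
    by_cases h : p.1 = x
    · have hp : p = (x, p.2) := by rw [← h]
      simp only [h, BEq.rfl, if_true, Option.getD_some]
      constructor
      · intro hrl
        exact ⟨p.2, by rw [hp]; exact List.mem_cons_self, hrl⟩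
      · rintro ⟨v, hv, hrl⟩
        rcases List.mem_cons.1 hv with he | ht
        · have hv2 : v = p.2 := congrArg Prod.snd he
          exact hv2 ▸ hrl
        · exfalso
          have hxm : x ∈ t.map Prod.fst := List.mem_map_of_mem ht
          exact (h ▸ hnd.1) hxm
    · have hb : (p.1 == x) = false := by simp [h]
      rw [hb, if_neg (by simp), ← PySem.Dict.getD_eq_get?_getD, ih hnd.2]
      constructor
      · rintro ⟨v, hv, hrl⟩
        exact ⟨v, List.mem_cons_of_mem _ hv, hrl⟩
      · rintro ⟨v, hv, hrl⟩
        rcases List.mem_cons.1 hv with he | ht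
        · exact absurd (congrArg Prod.fst he.symm) h
        · exact ⟨v, ht, hrl⟩

-- the inverted table agrees with the forward one: rl violated by x ↔ x forbidden for rl
theorem vdrInv (rl x : String) :
    rl ∈ PySem.Dict.getD vdrViolatedBy x ([] : List String) ↔ x ∈ vdrForb rl := by
  rw [vdrTable_items, vdrL vdrPairs (by decide)]
  unfold vdrForb
  by_cases h1 : rl = "vegetarian"
  · subst h1; simp [vdrPairs, or_and_right, and_assoc, exists_or]
  by_cases h2 : rl = "vegan"
  · subst h2; simp [vdrPairs, h1, or_and_right, and_assoc, exists_or]; tauto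
  by_cases h3 : rl = "gluten-free"
  · subst h3; simp [vdrPairs, h1, h2, or_and_right, and_assoc, exists_or]
  by_cases h4 : rl = "dairy-free"
  · subst h4; simp [vdrPairs, h1, h2, h3, or_and_right, and_assoc, exists_or]
  by_cases h5 : rl = "nut-free"
  · subst h5; simp [vdrPairs, h1, h2, h3, h4, or_and_right, and_assoc, exists_or]
  · simp only [vdrPairs, List.mem_cons, List.not_mem_nil, or_false, Prod.mk.injEq,
               if_neg h1, if_neg h2, if_neg h3, if_neg h4, if_neg h5]
    simp only [iff_false, not_exists, not_and]
    rintro v (⟨hx, rfl⟩ | ⟨hx, rfl⟩ | ⟨hx, rfl⟩ | ⟨hx, rfl⟩ | ⟨hx, rfl⟩ | ⟨hx, rfl⟩ | ⟨hx, rfl⟩ | ⟨hx, rfl⟩ | ⟨hx, rfl⟩ | ⟨hx, rfl⟩ | ⟨hx, rfl⟩ | ⟨hx, rfl⟩ | ⟨hx, rfl⟩ | ⟨hx, rfl⟩ | ⟨hx, rfl⟩ | ⟨hx, rfl⟩ | ⟨hx, rfl⟩ | ⟨hx, rfl⟩ | ⟨hx, rfl⟩ | ⟨hx, rfl⟩ |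 ⟨hx, rfl⟩ | ⟨hx, rfl⟩) <;>
      simp [h1, h2, h3, h4, h5]

-- membership in B's accumulated violated-set
theorem vdrFold_mem (ings : List String) (acc : PySem.Set String) (rl : String) :
    rl ∈ ings.foldl
        (fun a ing => PySem.Set.update a (PySem.Dict.getD vdrViolatedBy (PySem.Str.lower ing) []))
        acc
      ↔ rl ∈ acc ∨ ∃ ing ∈ ings, rl ∈ PySem.Dict.getD vdrViolatedBy (PySem.Str.lower ing) ([] : List String) := by
  induction ings generalizing acc with
  | nil => simp
  | cons i rest ih =>
    simp only [List.foldl_cons, ih, PySem.Set.mem_update]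
    constructor
    · rintro (⟨h | h⟩ | ⟨w, hw, hr⟩)
      · exact Or.inl h
      · exact Or.inr ⟨i, by simp, h⟩
      · exact Or.inr ⟨w, by simp [hw], hr⟩
    · rintro (h | ⟨w, hw, hr⟩)
      · exact Or.inl (Or.inl h)
      · rcases (List.mem_cons).1 hw with rfl | hw
        · exact Or.inl (Or.inr hr)
        · exact Or.inr ⟨w, hw, hr⟩

-- A's early-return loop is List.any of the per-restriction check
theorem vdrLoopA_eq_any (ings : List String) (dr : List String) :
    vdrLoopA ings dr = dr.any (fun r => vdrCheckA ings r) := by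
  induction dr with
  | nil => rfl
  | cons r rest ih => simp [vdrLoopA, ih]

-- both get helpers compute the same assoc-list lookup
theorem vdrGet_eq (recipe : List (String × List String)) (k : String) :
    vdrGetA recipe k = vdrGetB recipe k := by
  unfold vdrGetA vdrGetB
  induction recipe with
  | nil => rfl
  | cons p rest ih =>
    rw [PySem.Dict.getD_eq_get?_getD, PySem.Dict.get?_mk_cons]
    by_cases h : p.1 = k <;>
      simp_all [PySem.Dict.getD_eq_get?_getD]

-- pointwise: A's per-restriction check equals membership in B's violated-set
theorem vdrPoint (ings : List String) (r : String) :
    vdrCheckA (ings.map PySem.Str.lower) r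
      = PySem.Set.contains
          (ings.foldl (fun a i => PySem.Set.update a (PySem.Dict.getD vdrViolatedBy (PySem.Str.lower i) []))
            PySem.Set.empty)
          (PySem.Str.lower r) := by
  rw [vdrCheckA_eq_forb, Bool.eq_iff_iff]
  simp only [List.any_eq_true, List.contains_iff_mem, PySem.Set.contains,
             vdrFold_mem, PySem.Set.empty, List.not_mem_nil, false_or, List.mem_map]
  constructor
  · rintro ⟨f, hf, ing, hing, rfl⟩
    exact ⟨ing, hing, (vdrInv _ _).2 hf⟩
  · rintro ⟨ing, hing, hr⟩
    exact ⟨PySem.Str.lower ing, (vdrInv _ _).1 hr, ing, hing, rfl⟩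

-- ===== VERDICT (by name: the statement is the Claim_ definition above) =====
theorem violates_dietary_restrictions_spec : Claim_equal_violates_dietary_restrictions := by
  intro recipe dr _
  unfold Spec_violates_dietary_restrictions
  unfold violates_dietary_restrictions violates_dietary_restrictions_alt
  cases dr with
  | nil => simp
  | cons r rest =>
    simp only [List.isEmpty_cons, Bool.false_eq_true, if_false, vdrLoopA_eq_any, vdrGet_eq,
               vdrPoint]
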